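-- pv_equiv track=rewrite | github.com/shirohigexe/PROYECTO-CRIPTOGRAFIA | digitalfirmv1.py | campo
-- ===== SOURCE A (Python) =====
-- def campo(q):
--     campo_elementos = []
--     campo = []
--     for i in range(q): #i toma valores de 0-(q-1)
--         clase_equivalencia = []
--         for j in range(10):  # i = j mod q -> j-i=mq
--             if (j-i) % q == 0:
--                 clase_equivalencia.append(j)
--                 campo_elementos.append(j)
--         campo.append(clase_equivalencia)
--     return campo_elementos
-- ===== SOURCE B (Python) =====
-- def campo(q):
--     # For each residue class r (0 <= r < min(q,10)), its members below 10 are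
--     # r, r+q, r+2q, ... -- emitted directly, no membership test over 0..9 per i.
--     out = []
--     for r in range(min(q, 10)):
--         out.extend(range(r, 10, q))
--     return out
-- ===== Notes on version B (the rewrite author's own statement) =====
-- stated objective: faster
-- what changed: Instead of scanning all ten candidates for every i in 0..q-1 with a modulus test, B iterates only the residues r < min(q,10) and emits each class r, r+q, ... < 10 directly via range(r, 10, q).
import Mathlib
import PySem

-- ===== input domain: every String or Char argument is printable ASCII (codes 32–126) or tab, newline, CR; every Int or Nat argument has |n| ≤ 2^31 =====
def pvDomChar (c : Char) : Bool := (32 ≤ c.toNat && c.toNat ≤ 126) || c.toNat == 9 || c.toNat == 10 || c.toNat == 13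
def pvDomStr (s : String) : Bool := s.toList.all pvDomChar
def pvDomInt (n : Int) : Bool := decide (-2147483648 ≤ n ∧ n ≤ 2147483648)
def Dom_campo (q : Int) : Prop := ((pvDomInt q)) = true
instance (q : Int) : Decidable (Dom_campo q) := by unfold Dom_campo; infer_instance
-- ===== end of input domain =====

-- B replaces A's q×10 double scan with a direct emission of each residue class r, r+q, … < 10 (objective: faster).

-- ===== PORT A =====
-- state: (campo_elementos, campo); inner state: (clase_equivalencia, campo_elementos)
def campo (q : Int) : List Int :=
  let st :=
    (PySem.List.pyRange 0 q 1).foldl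
      (fun (st : List Int × List (List Int)) i =>
        let inner :=
          (PySem.List.pyRange 0 10 1).foldl
            (fun (st2 : List Int × List Int) j =>
              if PySem.Int.mod (j - i) q = 0 then (st2.1 ++ [j], st2.2 ++ [j]) else st2)
            (([] : List Int), st.1)
        (inner.2, st.2 ++ [inner.1]))
      (([] : List Int), ([] : List (List Int)))
  st.1

-- ===== PORT B =====
def campo_alt (q : Int) : List Int :=
  (PySem.List.pyRange 0 (min q 10) 1).foldl
    (fun acc r => acc ++ PySem.List.pyRange r 10 q) []

-- ===== PRECONDITION & SPEC =====
def Spec_campo (q : Int) (out : List Int) : Prop := out = campo_alt q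
instance (q : Int) (out : List Int) : Decidable (Spec_campo q out) := by unfold Spec_campo; infer_instance

-- ===== CLAIM (what is proved, stated in full; the proofs are below) =====
def Claim_equal_campo : Prop := ∀ (q : Int), Dom_campo q → Spec_campo q (campo q)

-- ===== LEMMAS AND PROOFS =====

-- the inner loop appends the same filtered list to both components of its state
theorem pv_pairfold (l : List Int) (p : Int → Prop) [DecidablePred p] (c acc : List Int) :
    l.foldl (fun (st2 : List Int × List Int) j =>
        if p j then (st2.1 ++ [j], st2.2 ++ [j]) else st2) (c, acc)
      = (c ++ l.filter (fun j => decide (p j)), acc ++ l.filter (fun j => decide (p j))) := by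
  induction l generalizing c acc with
  | nil => simp
  | cons x t ih =>
    by_cases hx : p x <;> simp [List.foldl_cons, hx, ih]

-- A's campo_elementos is a flatMap of per-i filters
theorem pv_campo_eq_flatMap (q : Int) :
    campo q = (PySem.List.pyRange 0 q 1).flatMap
      (fun i => (PySem.List.pyRange 0 10 1).filter
        (fun j => decide (PySem.Int.mod (j - i) q = 0))) := by
  unfold campo
  have h : ∀ (l : List Int) (e : List Int) (cf : List (List Int)),
      (l.foldl (fun (st : List Int × List (List Int)) i =>
        let inner :=
          (PySem.List.pyRange 0 10 1).foldl
            (fun (st2 : List Int × List Int) j =>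
              if PySem.Int.mod (j - i) q = 0 then (st2.1 ++ [j], st2.2 ++ [j]) else st2)
            (([] : List Int), st.1)
        (inner.2, st.2 ++ [inner.1])) (e, cf)).1
      = e ++ l.flatMap (fun i => (PySem.List.pyRange 0 10 1).filter
          (fun j => decide (PySem.Int.mod (j - i) q = 0))) := by
    intro l
    induction l with
    | nil => simp
    | cons x t ih =>
      intro e cf
      simp only [List.foldl_cons, List.flatMap_cons]
      rw [pv_pairfold]
      simp [ih]
  simpa using h (PySem.List.pyRange 0 q 1) [] []

theorem pv_mod_zero_iff (q i j : Int) (hi0 : 0 ≤ i) (hiq : i < q) (hj0 : 0 ≤ j)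
    (hj : j < 10) (hq : 10 ≤ q) : (PySem.Int.mod (j - i) q = 0 ↔ j = i) := by
  rw [PySem.Int.mod_eq_zero_iff_dvd]
  constructor
  · intro hdvd
    by_contra hne
    rcases lt_or_gt_of_ne (fun h => hne h) with hlt | hgt
    · have h1 : q ≤ i - j := Int.le_of_dvd (by omega) (by simpa using hdvd.neg_right)
      omega
    · have h1 : q ≤ j - i := Int.le_of_dvd (by omega) hdvd
      omega
  · intro h; simp [h]

-- A for q ≥ 10: every class is a singleton, result is 0..9
theorem pv_campo_big (q : Int) (hq : 10 ≤ q) :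
    campo q = [0, 1, 2, 3, 4, 5, 6, 7, 8, 9] := by
  rw [pv_campo_eq_flatMap]
  rw [PySem.List.pyRange_one_append 0 10 q (by omega) hq, List.flatMap_append]
  have h10 : (PySem.List.pyRange 0 10 1) = [0,1,2,3,4,5,6,7,8,9] := by decide
  have hsmall : ∀ i : Int, 0 ≤ i → i < 10 →
      List.filter (fun j => decide (PySem.Int.mod (j - i) q = 0)) [0,1,2,3,4,5,6,7,8,9] = [i] := by
    intro i h0 h1
    have hpred : ∀ x ∈ ([0,1,2,3,4,5,6,7,8,9] : List Int),
        decide (PySem.Int.mod (x - i) q = 0) = decide (x = i) := by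
      intro x hx
      have hx' : 0 ≤ x ∧ x < 10 := by simp at hx; omega
      exact decide_eq_decide.mpr (pv_mod_zero_iff q i x h0 (by omega) hx'.1 hx'.2 hq)
    rw [List.filter_congr hpred]
    interval_cases i <;> decide
  have htail : ∀ i ∈ PySem.List.pyRange 10 q 1,
      (PySem.List.pyRange 0 10 1).filter
        (fun j => decide (PySem.Int.mod (j - i) q = 0)) = [] := by
    intro i hi
    have hi' := PySem.List.mem_pyRange_one.mp hi
    rw [List.filter_eq_nil_iff]
    intro j hj
    have hj' := PySem.List.mem_pyRange_one.mp hj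
    simp only [decide_eq_true_eq]
    rw [PySem.Int.mod_eq_zero_iff_dvd]
    intro hdvd
    have h1 : q ≤ i - j := Int.le_of_dvd (by omega) (by simpa using hdvd.neg_right)
    omega
  have h2 : (PySem.List.pyRange 10 q 1).flatMap
      (fun i => (PySem.List.pyRange 0 10 1).filter
        (fun j => decide (PySem.Int.mod (j - i) q = 0))) = [] := by
    rw [List.flatMap_eq_nil_iff]; exact htail
  rw [h2, List.append_nil]
  rw [h10]
  simp only [List.flatMap_cons, List.flatMap_nil]
  rw [hsmall 0 (by omega) (by omega), hsmall 1 (by omega) (by omega),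
      hsmall 2 (by omega) (by omega), hsmall 3 (by omega) (by omega),
      hsmall 4 (by omega) (by omega), hsmall 5 (by omega) (by omega),
      hsmall 6 (by omega) (by omega), hsmall 7 (by omega) (by omega),
      hsmall 8 (by omega) (by omega), hsmall 9 (by omega) (by omega)]
  rfl

-- B for q ≥ 10: each range(r, 10, q) is the singleton [r]
theorem pv_range_singleton (q r : Int) (hq : 10 ≤ q) (h0 : 0 ≤ r) (h1 : r < 10) :
    PySem.List.pyRange r 10 q = [r] := by
  rw [PySem.List.pyRange_of_pos r 10 (by omega)]
  have hd : ((10 - r + q - 1) / q) = 1 := by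
    rw [show (10 : Int) - r + q - 1 = (9 - r) + 1 * q by ring,
        Int.add_mul_ediv_right _ _ (by omega : q ≠ 0),
        Int.ediv_eq_zero_of_lt (by omega) (by omega)]
    norm_num
  rw [if_pos (by omega), hd]
  simp

theorem pv_alt_big (q : Int) (hq : 10 ≤ q) :
    campo_alt q = [0, 1, 2, 3, 4, 5, 6, 7, 8, 9] := by
  unfold campo_alt
  rw [min_eq_right hq, PySem.List.foldl_append_eq_flatMap]
  have h10 : (PySem.List.pyRange 0 10 1) = [0,1,2,3,4,5,6,7,8,9] := by decide
  rw [h10]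
  simp only [List.flatMap_cons, List.flatMap_nil]
  rw [pv_range_singleton q 0 hq (by omega) (by omega), pv_range_singleton q 1 hq (by omega) (by omega),
      pv_range_singleton q 2 hq (by omega) (by omega), pv_range_singleton q 3 hq (by omega) (by omega),
      pv_range_singleton q 4 hq (by omega) (by omega), pv_range_singleton q 5 hq (by omega) (by omega),
      pv_range_singleton q 6 hq (by omega) (by omega), pv_range_singleton q 7 hq (by omega) (by omega),
      pv_range_singleton q 8 hq (by omega) (by omega), pv_range_singleton q 9 hq (by omega) (by omega)]
  rfl

-- ===== VERDICT (by name: the statement is the Claim_ definition above) =====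
theorem campo_spec : Claim_equal_campo := by
  intro q _
  unfold Spec_campo
  rcases (by omega : q ≤ 0 ∨ 0 < q) with hq0 | hq0
  · unfold campo campo_alt
    rw [PySem.List.pyRange_one_eq_nil hq0,
        PySem.List.pyRange_one_eq_nil (by omega : min q 10 ≤ 0)]
    rfl
  · rcases (by omega : q < 10 ∨ 10 ≤ q) with hq10 | hq10
    · interval_cases q <;> decide
    · rw [pv_campo_big q hq10, pv_alt_big q hq10]
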